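-- pv_equiv track=rewrite | github.com/ddooxhuy09/etsy-business-dashboard | api/import_routes.py | _same_snapshot
-- ===== SOURCE A (Python) =====
-- def _same_snapshot(snap: dict, current: dict) -> bool:
--     if set(snap.keys()) != set(current.keys()):
--         return False
--     for k in snap:
--         sa = snap[k] if isinstance(snap[k], list) else [snap[k]]
--         ca = current[k] if isinstance(current[k], list) else [current[k]]
--         if len(sa) != len(ca):
--             return False
--         for i, (s, c) in enumerate(zip(sa, ca)):
--             if s.get("filename") != c.get("filename") or s.get("size") != c.get("size"):
--                 return False
--     return True
-- ===== SOURCE B (Python) =====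
-- def _same_snapshot(snap: dict, current: dict) -> bool:
--     def rows(d):
--         out = set()
--         for k in d:
--             seq = d[k] if isinstance(d[k], list) else [d[k]]
--             for i, x in enumerate(seq):
--                 out.add((k, i, x.get("filename"), x.get("size")))
--         return out
--     return snap.keys() == current.keys() and rows(snap) == rows(current)
-- ===== Notes on version B (the rewrite author's own statement) =====
-- stated objective: alternative
-- what changed: Instead of A's interleaved per-key loops that align the two value lists and compare element by element with early exits and an explicit length guard, B flattens each snapshot into a set of (key, index, filename, size) rows and decides by one key-view comparison plus one set-equality test; no per-key pairing or length check is needed because the (key, index) component makes rows unique.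
import Mathlib
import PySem

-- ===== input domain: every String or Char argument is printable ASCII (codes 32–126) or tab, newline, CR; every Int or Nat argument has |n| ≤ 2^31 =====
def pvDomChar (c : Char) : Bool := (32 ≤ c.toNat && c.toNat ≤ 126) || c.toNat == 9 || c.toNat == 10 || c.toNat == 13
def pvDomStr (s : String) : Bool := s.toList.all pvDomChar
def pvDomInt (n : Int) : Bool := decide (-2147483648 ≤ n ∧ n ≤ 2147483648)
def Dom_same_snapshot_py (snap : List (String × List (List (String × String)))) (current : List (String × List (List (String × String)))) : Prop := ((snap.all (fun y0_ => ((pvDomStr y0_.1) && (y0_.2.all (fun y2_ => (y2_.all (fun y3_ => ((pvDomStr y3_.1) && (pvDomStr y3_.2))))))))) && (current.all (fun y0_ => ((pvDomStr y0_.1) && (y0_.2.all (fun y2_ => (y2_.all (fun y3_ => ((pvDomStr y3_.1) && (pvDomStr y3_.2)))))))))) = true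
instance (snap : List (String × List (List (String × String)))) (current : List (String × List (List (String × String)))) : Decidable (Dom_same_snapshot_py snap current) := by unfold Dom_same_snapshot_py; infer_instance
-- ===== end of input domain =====

-- B replaces A's interleaved per-key loops (length guard + element-by-element field comparison
-- with early exits) by flattening each snapshot into a SET of (key, index, filename, size) rows
-- and comparing the key views and the two row sets once — objective: alternative decomposition.

-- ===== PORT A =====
-- dict lookup d.get(k) / d[k]: first match on the association list
def pvGet {α : Type} (d : List (String × α)) (k : String) : Option α :=
  PySem.Dict.get? ⟨d⟩ k

-- inner 'for i, (s, c) in enumerate(zip(sa, ca))' loop of A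
def pvItemsEqA : List (List (String × String)) → List (List (String × String)) → Bool
  | s :: ss, c :: cs =>
      if pvGet s "filename" ≠ pvGet c "filename" ∨ pvGet s "size" ≠ pvGet c "size" then false
      else pvItemsEqA ss cs
  | _, _ => true

-- outer 'for k in snap' loop of A.  Values have Lean type List …, so Python's
-- 'isinstance(v, list)' is always true here: the '[v]' branch is unreachable under the type convention.
def pvLoopA (snap current : List (String × List (List (String × String)))) : List String → Bool
  | [] => true
  | k :: ks =>
      let sa := (pvGet snap k).getD []
      let ca := (pvGet current k).getD []
      if sa.length ≠ ca.length then false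
      else if pvItemsEqA sa ca then pvLoopA snap current ks else false

def same_snapshot_py (snap : List (String × List (List (String × String)))) (current : List (String × List (List (String × String)))) : Bool :=
  if ¬ (PySem.Set.equal (PySem.Set.ofList (PySem.Dict.keys ⟨snap⟩)) (PySem.Set.ofList (PySem.Dict.keys ⟨current⟩)) = true) then false
  else pvLoopA snap current (PySem.Dict.keys ⟨snap⟩)

-- ===== PORT B =====
-- one row (k, i, x.get("filename"), x.get("size")) added by B's inner loop
def pvRowOf (k : String) (ix : Int × List (String × String)) : String × Int × Option String × Option String :=
  (k, ix.1, pvGet ix.2 "filename", pvGet ix.2 "size")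

-- B's rows(d): 'for k in d: for i, x in enumerate(seq): out.add(...)' building a Python set
def pvRowsB (d : List (String × List (List (String × String)))) : PySem.Set (String × Int × Option String × Option String) :=
  (PySem.Dict.keys ⟨d⟩).foldl
    (fun out k =>
      (PySem.List.enumerate ((pvGet d k).getD [])).foldl
        (fun out ix => PySem.Set.add out (pvRowOf k ix)) out)
    PySem.Set.empty

def same_snapshot_py_alt (snap : List (String × List (List (String × String)))) (current : List (String × List (List (String × String)))) : Bool :=
  PySem.Set.equal (PySem.Set.ofList (PySem.Dict.keys ⟨snap⟩)) (PySem.Set.ofList (PySem.Dict.keys ⟨current⟩))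
  && PySem.Set.equal (pvRowsB snap) (pvRowsB current)

-- ===== PRECONDITION & SPEC =====
def Spec_same_snapshot_py (snap : List (String × List (List (String × String)))) (current : List (String × List (List (String × String)))) (out : Bool) : Prop := out = same_snapshot_py_alt snap current
instance (snap : List (String × List (List (String × String)))) (current : List (String × List (List (String × String)))) (out : Bool) : Decidable (Spec_same_snapshot_py snap current out) := by unfold Spec_same_snapshot_py; infer_instance

-- ===== CLAIM (what is proved, stated in full; the proofs are below) =====
def Claim_equal_same_snapshot_py : Prop := ∀ (snap : List (String × List (List (String × String)))) (current : List (String × List (List (String × String)))), Dom_same_snapshot_py snap current → Spec_same_snapshot_py snap current (same_snapshot_py snap current)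

-- ===== LEMMAS AND PROOFS =====

theorem loopA_eq_all (snap current : List (String × List (List (String × String)))) (ks : List String) :
    pvLoopA snap current ks =
      ks.all (fun k => (((pvGet snap k).getD []).length == ((pvGet current k).getD []).length)
        && pvItemsEqA ((pvGet snap k).getD []) ((pvGet current k).getD [])) := by
  induction ks with
  | nil => rfl
  | cons k ks ih =>
      simp only [pvLoopA, List.all_cons, ih]
      split_ifs with h1 h2 <;> simp_all

theorem itemsEqA_iff (sa ca : List (List (String × String))) (h : sa.length = ca.length) :
    pvItemsEqA sa ca = true ↔ ∀ i : Nat, i < sa.length →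
      (pvGet (sa.getD i []) "filename", pvGet (sa.getD i []) "size")
        = (pvGet (ca.getD i []) "filename", pvGet (ca.getD i []) "size") := by
  induction sa generalizing ca with
  | nil => cases ca <;> simp [pvItemsEqA] at h ⊢
  | cons s ss ih =>
      cases ca with
      | nil => simp at h
      | cons c cs =>
          simp only [pvItemsEqA, List.length_cons] at h ⊢
          have hlen : ss.length = cs.length := by omega
          split_ifs with hc
          · simp only [false_iff, not_forall]
            refine ⟨0, by omega, ?_⟩
            simp only [List.getD_cons_zero, Prod.mk.injEq, not_and_or]
            tauto
          · rw [not_or, not_not, not_not] at hc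
            rw [ih cs hlen]
            constructor
            · intro hh i hi
              cases i with
              | zero => simp [hc.1, hc.2]
              | succ j => simpa using hh j (by omega)
            · intro hh j hj
              simpa using hh (j + 1) (by omega)

-- membership in B's whole double loop
theorem mem_rowsB (d : List (String × List (List (String × String)))) (r : String × Int × Option String × Option String) :
    r ∈ pvRowsB d ↔ ∃ k ∈ (⟨d⟩ : PySem.Dict String (List (List (String × String)))).keys,
      ∃ i : Nat, i < ((pvGet d k).getD []).length ∧
        r = (k, (i : Int), pvGet (((pvGet d k).getD []).getD i []) "filename",
                            pvGet (((pvGet d k).getD []).getD i []) "size") := by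
  unfold pvRowsB
  generalize (⟨d⟩ : PySem.Dict String (List (List (String × String)))).keys = ks
  induction ks using List.reverseRecOn with
  | nil => simp [PySem.Set.empty]
  | append_singleton ks k ih =>
      rw [List.foldl_append, List.foldl_cons, List.foldl_nil, PySem.Set.mem_foldl_add, ih]
      constructor
      · rintro (⟨k', hk', i, hi, hr⟩ | ⟨ix, hix, hr⟩)
        · exact ⟨k', by simp [hk'], i, hi, hr⟩
        · rw [PySem.List.mem_enumerate_iff] at hix
          obtain ⟨j, hj, hij⟩ := hix
          subst hij
          exact ⟨k, by simp, j, hj, by simpa [pvRowOf, List.getElem?_eq_getElem hj] using hr⟩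
      · rintro ⟨k', hk', i, hi, hr⟩
        rcases List.mem_append.mp hk' with hk' | hk'
        · exact Or.inl ⟨k', hk', i, hi, hr⟩
        · rw [List.mem_singleton] at hk'
          subst hk'
          refine Or.inr ⟨((i : Int), ((pvGet d k').getD []).getD i []), ?_, ?_⟩
          · rw [PySem.List.mem_enumerate_iff]
            exact ⟨i, hi, by simp [List.getElem?_eq_getElem hi]⟩
          · simpa [pvRowOf] using hr

theorem set_equal_mem_iff {α : Type} [BEq α] [LawfulBEq α] (xs ys : List α) :
    PySem.Set.equal (PySem.Set.ofList xs) (PySem.Set.ofList ys) = true ↔ (∀ a, a ∈ xs ↔ a ∈ ys) := by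
  rw [PySem.Set.equal_iff]
  constructor <;> intro h a <;> simpa only [PySem.Set.mem_ofList] using h a

-- ===== VERDICT (by name: the statement is the Claim_ definition above) =====
theorem same_snapshot_py_spec : Claim_equal_same_snapshot_py := by
  intro snap current _
  unfold Spec_same_snapshot_py same_snapshot_py same_snapshot_py_alt
  by_cases hset : PySem.Set.equal (PySem.Set.ofList (PySem.Dict.keys ⟨snap⟩)) (PySem.Set.ofList (PySem.Dict.keys ⟨current⟩)) = true
  · simp only [hset, not_true_eq_false, if_false, Bool.true_and]
    have hmem := (set_equal_mem_iff _ _).mp hset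
    rw [loopA_eq_all, Bool.eq_iff_iff, PySem.Set.equal_iff]
    simp only [List.all_eq_true, Bool.and_eq_true, beq_iff_eq]
    constructor
    · -- A's per-key check implies row-set equality
      intro h a
      rw [mem_rowsB, mem_rowsB]
      constructor
      · rintro ⟨k, hk, i, hi, ha⟩
        obtain ⟨hlen, hfields⟩ := h k hk
        have := (itemsEqA_iff _ _ hlen).mp hfields i hi
        refine ⟨k, (hmem k).mp hk, i, by omega, ?_⟩
        rw [ha]
        simp only [Prod.mk.injEq] at this
        rw [this.1, this.2]
      · rintro ⟨k, hk, i, hi, ha⟩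
        have hks : k ∈ PySem.Dict.keys ⟨snap⟩ := (hmem k).mpr hk
        obtain ⟨hlen, hfields⟩ := h k hks
        have := (itemsEqA_iff _ _ hlen).mp hfields i (by omega)
        refine ⟨k, hks, i, by omega, ?_⟩
        rw [ha]
        simp only [Prod.mk.injEq] at this
        rw [this.1, this.2]
    · -- row-set equality implies A's per-key check
      intro h k hk
      have key : ∀ i : Nat, i < ((pvGet snap k).getD []).length →
          i < ((pvGet current k).getD []).length ∧
          (pvGet (((pvGet snap k).getD []).getD i []) "filename",
           pvGet (((pvGet snap k).getD []).getD i []) "size")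
            = (pvGet (((pvGet current k).getD []).getD i []) "filename",
               pvGet (((pvGet current k).getD []).getD i []) "size") := by
        intro i hi
        have hin : (k, (i : Int), pvGet (((pvGet snap k).getD []).getD i []) "filename",
            pvGet (((pvGet snap k).getD []).getD i []) "size") ∈ pvRowsB snap := by
          rw [mem_rowsB]; exact ⟨k, hk, i, hi, rfl⟩
        rw [h, mem_rowsB] at hin
        obtain ⟨k', hk', j, hj, he⟩ := hin
        simp only [Prod.mk.injEq] at he
        obtain ⟨hk'', hij, hf, hs⟩ := he
        subst hk''
        have : i = j := by exact_mod_cast hij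
        subst this
        exact ⟨hj, by rw [hf, hs]⟩
      have key' : ∀ i : Nat, i < ((pvGet current k).getD []).length →
          i < ((pvGet snap k).getD []).length := by
        intro i hi
        have hin : (k, (i : Int), pvGet (((pvGet current k).getD []).getD i []) "filename",
            pvGet (((pvGet current k).getD []).getD i []) "size") ∈ pvRowsB current := by
          rw [mem_rowsB]; exact ⟨k, (hmem k).mp hk, i, hi, rfl⟩
        rw [← h, mem_rowsB] at hin
        obtain ⟨k', hk', j, hj, he⟩ := hin
        simp only [Prod.mk.injEq] at he
        obtain ⟨hk'', hij, -⟩ := he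
        subst hk''
        have : i = j := by exact_mod_cast hij
        subst this
        exact hj
      have hlen : ((pvGet snap k).getD []).length = ((pvGet current k).getD []).length := by
        rcases Nat.lt_or_ge ((pvGet snap k).getD []).length ((pvGet current k).getD []).length with hl | hl
        · exact absurd (key' _ hl) (by omega)
        · rcases Nat.lt_or_ge ((pvGet current k).getD []).length ((pvGet snap k).getD []).length with hl2 | hl2
          · exact absurd ((key _ hl2).1) (by omega)
          · omega
      exact ⟨hlen, (itemsEqA_iff _ _ hlen).mpr (fun i hi => (key i hi).2)⟩
  · have hc := Bool.eq_false_iff.mpr hset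
    simp only [PySem.Dict.keys] at hc
    simp [hc]
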